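-- pv_equiv track=rewrite | github.com/matvey270/pyp | p2.py | f
-- ===== SOURCE A (Python) =====
-- def f(x):
--     x=bin(x)
--     po=0
--     pl=0
--     for i in x:
--         if i == '0':
--             po+=1
--         else:
--             pl+=1
--     if po>=1 and pl>=3:
--         return True
--     else:
--         return False
-- ===== SOURCE B (Python) =====
-- def f(x):
--     if x < 0:
--         return True
--     if x == 0:
--         return False
--     return (x & (x - 1)) != 0
-- ===== Notes on version B (the rewrite author's own statement) =====
-- stated objective: simpler
-- what changed: Replaces building the bin(x) string and counting its characters in a loop with a direct sign test plus the x&(x-1) power-of-two bit trick, with no string construction or loop at all.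
import Mathlib
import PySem

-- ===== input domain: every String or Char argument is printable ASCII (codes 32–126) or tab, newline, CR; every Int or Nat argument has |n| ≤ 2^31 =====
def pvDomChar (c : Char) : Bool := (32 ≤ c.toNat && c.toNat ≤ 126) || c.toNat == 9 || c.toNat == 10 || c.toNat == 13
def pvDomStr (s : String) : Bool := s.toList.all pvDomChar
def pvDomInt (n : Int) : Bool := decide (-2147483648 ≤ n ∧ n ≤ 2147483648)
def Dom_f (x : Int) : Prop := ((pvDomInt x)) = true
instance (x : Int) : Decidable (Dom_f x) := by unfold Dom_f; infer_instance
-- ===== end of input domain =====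

-- B replaces A's bin(x)-string character-counting loop with a sign test and the x&(x-1) bit trick (simpler, no string).

-- ===== PORT A =====
-- x = bin(x); count '0' chars (po) and all other chars (pl); return po>=1 and pl>=3
def f (x : Int) : Bool :=
  let s := PySem.Int.pyBin x
  let r := s.toList.foldl
    (fun (p : Nat × Nat) i => if i = '0' then (p.1 + 1, p.2) else (p.1, p.2 + 1)) (0, 0)
  if r.1 ≥ 1 ∧ r.2 ≥ 3 then true else false

-- ===== PORT B =====
def f_alt (x : Int) : Bool :=
  if x < 0 then true
  else if x = 0 then false
  else PySem.Int.band x (x - 1) != 0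

-- ===== PRECONDITION & SPEC =====
def Spec_f (x : Int) (out : Bool) : Prop := out = f_alt x
instance (x : Int) (out : Bool) : Decidable (Spec_f x out) := by unfold Spec_f; infer_instance

-- ===== CLAIM (what is proved, stated in full; the proofs are below) =====
def Claim_equal_f : Prop := ∀ (x : Int), Dom_f x → Spec_f x (f x)

-- ===== LEMMAS AND PROOFS =====

-- A's counting loop computes the two countP's.
lemma pvCountFold (l : List Char) (a b : Nat) :
    l.foldl (fun (p : Nat × Nat) i => if i = '0' then (p.1 + 1, p.2) else (p.1, p.2 + 1)) (a, b)
      = (a + l.countP (fun c => c == '0'), b + l.countP (fun c => !(c == '0'))) := by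
  induction l generalizing a b with
  | nil => simp
  | cons c t ih =>
    by_cases h : c = '0' <;>
      simp [List.foldl_cons, h, ih] <;> omega

-- non-'0' characters of the binary digit string of n are exactly the set bits of n
lemma pvDigitsOnes : ∀ (fuel n : Nat) (ds : List Char), n < fuel →
    (Nat.toDigitsCore 2 fuel n ds).countP (fun c => !(c == '0'))
      = PySem.Int.bitCount (n : Int) + ds.countP (fun c => !(c == '0')) := by
  intro fuel
  induction fuel with
  | zero => intro n ds h; omega
  | succ fuel ih =>
    intro n ds h
    rw [Nat.toDigitsCore]
    by_cases h2 : n / 2 = 0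
    · have hub : n < 2 := by omega
      simp only [h2, reduceIte]
      interval_cases n
      · simp [Nat.digitChar]
      · have h1 : PySem.Int.bitCount 1 = 1 := by decide
        simp [Nat.digitChar, h1]
        omega
    · simp only [if_neg h2]
      rw [ih (n / 2) _ (by omega)]
      have hbc : PySem.Int.bitCount (n : Int)
          = n % 2 + PySem.Int.bitCount ((n / 2 : Nat) : Int) :=
        PySem.Int.bitCount_natCast (by omega)
      have hd : (((n % 2).digitChar :: ds).countP (fun c => !(c == '0')))
          = n % 2 + ds.countP (fun c => !(c == '0')) := by
        rcases (by omega : n % 2 = 0 ∨ n % 2 = 1) with h0 | h0 <;>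
          simp [h0, List.countP_cons, Nat.digitChar] <;> omega
      rw [hd, hbc]; omega

lemma pvBitCountPos : ∀ n : Nat, 0 < n → 0 < PySem.Int.bitCount (n : Int) := by
  intro n
  induction n using Nat.strong_induction_on with
  | _ n ih =>
    intro hn
    rw [PySem.Int.bitCount_natCast hn]
    rcases Nat.mod_two_eq_zero_or_one n with he | ho
    · have h2 : 0 < n / 2 := by omega
      have := ih (n / 2) (by omega) h2
      omega
    · omega

lemma pvLandOddEven (m k : Nat) : (2 * m + 1) &&& (2 * k) = 2 * (m &&& k) := by
  have h := Nat.bitwise_bit (f := and) rfl true m false k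
  simpa [Nat.bit_val, HAnd.hAnd, AndOp.and, Nat.land] using h

lemma pvLandEvenOdd (m k : Nat) : (2 * m) &&& (2 * k + 1) = 2 * (m &&& k) := by
  have h := Nat.bitwise_bit (f := and) rfl false m true k
  simpa [Nat.bit_val, HAnd.hAnd, AndOp.and, Nat.land] using h

-- the power-of-two trick: n & (n-1) == 0 iff n has exactly one set bit
lemma pvLandPred : ∀ n : Nat, 0 < n → ((n &&& (n - 1)) = 0 ↔ PySem.Int.bitCount (n : Int) = 1) := by
  intro n
  induction n using Nat.strong_induction_on with
  | _ n ih =>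
    intro hn
    rcases Nat.even_or_odd n with he | ho
    · obtain ⟨a, ha⟩ := he
      have ha' : n = 2 * a := by omega
      have hapos : 0 < a := by omega
      have hpred : n - 1 = 2 * (a - 1) + 1 := by omega
      have hland : n &&& (n - 1) = 2 * (a &&& (a - 1)) := by
        rw [hpred, ha', pvLandEvenOdd]
      have hbc : PySem.Int.bitCount (n : Int) = PySem.Int.bitCount ((a : Nat) : Int) := by
        rw [PySem.Int.bitCount_natCast hn]
        have : n % 2 = 0 := by omega
        have h2 : n / 2 = a := by omega
        rw [this, h2]; omega
      rw [hland, hbc]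
      have := ih a (by omega) hapos
      omega
    · obtain ⟨a, ha⟩ := ho
      have hpred : n - 1 = 2 * a := by omega
      have hland : n &&& (n - 1) = 2 * (a &&& a) := by
        rw [hpred, ha, pvLandOddEven]
      rw [Nat.and_self] at hland
      have hbc : PySem.Int.bitCount (n : Int) = 1 + PySem.Int.bitCount ((a : Nat) : Int) := by
        rw [PySem.Int.bitCount_natCast hn]
        have h1 : n % 2 = 1 := by omega
        have h2 : n / 2 = a := by omega
        rw [h1, h2]
      rw [hland, hbc]
      constructor
      · intro h0
        have : a = 0 := by omega
        subst this
        simp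
      · intro h1
        have hbc0 : PySem.Int.bitCount ((a : Nat) : Int) = 0 := by omega
        by_contra hne
        have hap : 0 < a := by omega
        have := pvBitCountPos a hap
        omega

-- ===== VERDICT (by name: the statement is the Claim_ definition above) =====
-- count facts about the full bin(x) character list
lemma pvBinCounts (x : Int) :
    ((PySem.Int.pyBin x).toList.countP (fun c => !(c == '0')))
      = (if x < 0 then 2 else 1) + PySem.Int.bitCount x ∧
    1 ≤ (PySem.Int.pyBin x).toList.countP (fun c => c == '0') := by
  rw [PySem.Int.toList_pyBin]
  unfold PySem.Int.toBinChars0b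
  by_cases hx : x < 0
  · simp only [if_pos hx]
    have hd := pvDigitsOnes (x.natAbs + 1) x.natAbs [] (by omega)
    rw [Nat.toDigits] at *
    constructor
    · simp [List.countP_cons, hd]
      have habs : PySem.Int.bitCount |x| = PySem.Int.bitCount x := by
        rw [abs_of_neg hx, PySem.Int.bitCount_neg]
      omega
    · simp
  · simp only [if_neg hx]
    have hd := pvDigitsOnes (x.toNat + 1) x.toNat [] (by omega)
    rw [Nat.toDigits] at *
    constructor
    · simp [List.countP_cons, hd]
      have hmax : PySem.Int.bitCount (max x 0) = PySem.Int.bitCount x := by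
        rw [max_eq_left (by omega : (0:Int) ≤ x)]
      omega
    · simp

-- ===== VERDICT (by name: the statement is the Claim_ definition above) =====
theorem f_spec : Claim_equal_f := by
  intro x _
  simp only [Spec_f, f, f_alt]
  obtain ⟨h1, h0⟩ := pvBinCounts x
  rw [pvCountFold, h1]
  by_cases hneg : x < 0
  · -- negative: pl = 2 + bitCount ≥ 3 since bitCount > 0
    have hbc : 0 < PySem.Int.bitCount x := by
      have := pvBitCountPos x.natAbs (by omega)
      rcases Int.natAbs_eq x with h | h
      · rw [h]; exact_mod_cast this
      · rw [h]; simpa using this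
    rw [if_pos hneg, if_pos (by constructor <;> omega), if_pos hneg]
  · by_cases hzero : x = 0
    · subst hzero; decide
    · -- positive: pl = 1 + bitCount; condition ⟺ bitCount ≥ 2 ⟺ x & (x-1) ≠ 0
      obtain ⟨n, hn⟩ : ∃ n : Nat, x = (n : Int) :=
        ⟨x.toNat, (Int.toNat_of_nonneg (by omega)).symm⟩
      have hnpos : 0 < n := by omega
      subst hn
      have hband : PySem.Int.band (n : Int) ((n : Int) - 1) = ((n &&& (n - 1) : Nat) : Int) := by
        have : ((n : Int) - 1) = ((n - 1 : Nat) : Int) := by omega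
        rw [this, PySem.Int.band_natCast]
      have hiff := pvLandPred n hnpos
      have hpos := pvBitCountPos n hnpos
      rw [if_neg hneg, if_neg hneg, if_neg hzero]
      by_cases hb : (n &&& (n - 1)) = 0
      · have hbc1 : PySem.Int.bitCount ((n : Nat) : Int) = 1 := hiff.mp hb
        rw [if_neg (by omega)]
        simp [hband, hb]
      · have hbc2 : PySem.Int.bitCount ((n : Nat) : Int) ≠ 1 := fun hc => hb (hiff.mpr hc)
        rw [if_pos (by constructor <;> omega)]
        simp [hband]
        omega
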